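-- pv_equiv track=rewrite | github.com/kidnamedtony/practice_codeprobs | codewars_probs.py | dirReduc
-- ===== SOURCE A (Python) =====
-- opposite = {'NORTH': 'SOUTH', 'EAST': 'WEST', 'SOUTH': 'NORTH', 'WEST': 'EAST'}
--
-- def dirReduc(plan):
--     new_plan = []
--     for d in plan:
--         if new_plan and new_plan[-1] == opposite[d]:
--             new_plan.pop()
--         else:
--             new_plan.append(d)
--     return new_plan
-- ===== SOURCE B (Python) =====
-- opposite = {'NORTH': 'SOUTH', 'EAST': 'WEST', 'SOUTH': 'NORTH', 'WEST': 'EAST'}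
--
-- def dirReduc(plan):
--     res = list(plan)
--     while True:
--         for i in range(len(res) - 1):
--             if res[i] == opposite[res[i + 1]]:
--                 del res[i:i + 2]
--                 break
--         else:
--             return res
-- ===== Notes on version B (the rewrite author's own statement) =====
-- stated objective: alternative
-- what changed: Replaced A's single left-to-right stack pass (push, pop on cancel) by a fixpoint rewriter: repeatedly scan for the first adjacent pair (x, y) with x == opposite[y], delete it, and restart until a full scan finds none.
-- outside the precondition, e.g. on dirReduc(['NORTH', 'SOUTH', 'FOO']): A returns ['FOO'], B returns ['FOO']; on dirReduc(['NORTH', 'FOO']): A raises KeyError, B raises KeyError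
import Mathlib
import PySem

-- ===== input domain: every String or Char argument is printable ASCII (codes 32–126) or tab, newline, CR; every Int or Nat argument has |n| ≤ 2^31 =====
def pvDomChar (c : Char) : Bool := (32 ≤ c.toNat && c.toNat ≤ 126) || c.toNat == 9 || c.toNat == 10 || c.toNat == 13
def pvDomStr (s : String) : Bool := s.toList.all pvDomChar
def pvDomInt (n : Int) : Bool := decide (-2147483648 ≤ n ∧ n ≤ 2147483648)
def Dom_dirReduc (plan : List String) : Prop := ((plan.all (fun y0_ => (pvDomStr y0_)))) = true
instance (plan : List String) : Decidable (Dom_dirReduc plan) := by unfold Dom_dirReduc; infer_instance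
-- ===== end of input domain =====

-- B replaces A's one stack pass by a fixpoint rewriter (delete the first adjacent opposite pair,
-- repeat until none remains); objective: a genuinely different algorithm, same cost class in practice.

-- ===== PORT A =====
def pvOpposite : PySem.Dict String String :=
  PySem.Dict.ofList [("NORTH","SOUTH"),("EAST","WEST"),("SOUTH","NORTH"),("WEST","EAST")]

-- opposite[d]: Python raises KeyError for d outside the dict; Pre_ excludes every input on which a
-- lookup of a non-key could be reached, so the getD default "" is never the value used on Pre_.
def pvOpp (d : String) : String := pvOpposite.getD d ""

def dirReducGo (new_plan : List String) : List String → List String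
  | [] => new_plan
  | d :: rest =>
    if new_plan ≠ [] ∧ new_plan.getLast? = some (pvOpp d) then
      dirReducGo new_plan.dropLast rest
    else
      dirReducGo (new_plan ++ [d]) rest

def dirReduc (plan : List String) : List String := dirReducGo [] plan

-- ===== PORT B =====
-- one scan of Source B's inner for-loop: remove the FIRST adjacent pair with x == opposite[y]; none if no pair
def pvOnePass : List String → Option (List String)
  | [] => none
  | [_] => none
  | x :: y :: t => if x = pvOpp y then some t else (pvOnePass (y :: t)).map (x :: ·)

-- termination measure for the outer while-loop of Source B
theorem pvOnePass_length : ∀ {z r : List String}, pvOnePass z = some r → r.length < z.length := by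
  intro z
  induction z with
  | nil => intro r h; simp [pvOnePass] at h
  | cons x t ih =>
    intro r h
    cases t with
    | nil => simp [pvOnePass] at h
    | cons y t' =>
      simp only [pvOnePass] at h
      split at h
      · cases h; simp
      · rcases Option.map_eq_some_iff.mp h with ⟨r', hr', rfl⟩
        simpa using Nat.succ_lt_succ (ih hr')

def pvLoop (res : List String) : List String :=
  match h : pvOnePass res with
  | some r => pvLoop r
  | none => res
termination_by res.length
decreasing_by exact pvOnePass_length h

def dirReduc_alt (plan : List String) : List String := pvLoop plan

-- ===== PRECONDITION & SPEC =====
def pvDirs : List String := ["NORTH","SOUTH","EAST","WEST"]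

-- Pre_ excludes plans with a non-direction token after position 0: on those A raises KeyError,
-- except in the rare corner where cancellations have emptied A's stack exactly at each such token
-- and A still returns; B returns the same value in that corner (see cites).
def Pre_dirReduc (plan : List String) : Prop :=
  ∀ d ∈ plan.drop 1, d ∈ pvDirs

instance (plan : List String) : Decidable (Pre_dirReduc plan) := by
  unfold Pre_dirReduc; infer_instance

def pvWitness_dirReduc : List String := ["NORTH","WEST","SOUTH","WEST"]

def Spec_dirReduc (plan : List String) (out : List String) : Prop := out = dirReduc_alt plan
instance (plan : List String) (out : List String) : Decidable (Spec_dirReduc plan out) := by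
  unfold Spec_dirReduc; infer_instance

-- ===== CLAIM (what is proved, stated in full; the proofs are below) =====
def Claim_equal_dirReduc : Prop :=
  ∀ (plan : List String), Dom_dirReduc plan → Pre_dirReduc plan → Spec_dirReduc plan (dirReduc plan)

-- ===== LEMMAS AND PROOFS =====

-- the common normal form: right-fold reduction
def pvG (d : String) (z : List String) : List String :=
  if z.head? = some (pvOpp d) then z.tail else d :: z

def pvRed (l : List String) : List String := l.foldr pvG []

def pvRedP (z : List String) : Prop := List.IsChain (fun x y => y ≠ pvOpp x) z

theorem pvOpp_invol {d : String} (h : d ∈ pvDirs) : pvOpp (pvOpp d) = d := by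
  simp only [pvDirs, List.mem_cons] at h
  rcases h with rfl | rfl | rfl | rfl | h <;> first | rfl | simp_all

theorem pvOpp_mem {d : String} (h : d ∈ pvDirs) : pvOpp d ∈ pvDirs := by
  simp only [pvDirs, List.mem_cons] at h ⊢
  rcases h with rfl | rfl | rfl | rfl | h <;> first | (left; decide) | (right;left;decide) | (right;right;left;decide) | (right;right;right;left;decide) | simp_all

theorem pvG_redP {d : String} {z : List String} (hz : pvRedP z) : pvRedP (pvG d z) := by
  unfold pvG
  split
  · exact hz.tail
  · rename_i h
    refine List.isChain_cons.mpr ⟨?_, hz⟩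
    intro y hy heq
    apply h
    cases z with
    | nil => simp at hy
    | cons a t =>
      simp only [List.head?_cons, Option.mem_def, Option.some.injEq] at hy
      subst hy
      simp [heq]

theorem pvRed_redP (l : List String) : pvRedP (pvRed l) := by
  induction l with
  | nil => exact List.IsChain.nil
  | cons d t ih => exact pvG_redP ih

theorem pvRed_id {z : List String} (hz : pvRedP z) : pvRed z = z := by
  induction z with
  | nil => rfl
  | cons d t ih =>
    rcases List.isChain_cons.mp hz with ⟨hhd, ht⟩
    have hstep : pvRed (d :: t) = pvG d (pvRed t) := rfl
    rw [hstep, ih ht]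
    unfold pvG
    split
    · rename_i h
      cases t with
      | nil => simp at h
      | cons y t' =>
        simp only [List.head?_cons, Option.some.injEq] at h
        exact absurd h (hhd y rfl)
    · rfl

-- cancellation of (opp d) · d against a reduced word
theorem pvG_cancel {d : String} {z : List String} (hd : pvOpp (pvOpp d) = d)
    (hz : pvRedP z) : pvG (pvOpp d) (pvG d z) = z := by
  by_cases h : z.head? = some (pvOpp d)
  · cases z with
    | nil => simp at h
    | cons a zt =>
      simp only [List.head?_cons, Option.some.injEq] at h
      subst h
      rcases List.isChain_cons.mp hz with ⟨hhd, _⟩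
      have hne : zt.head? ≠ some (pvOpp (pvOpp d)) := by
        cases zt with
        | nil => simp
        | cons b zt' =>
          simp only [List.head?_cons, ne_eq, Option.some.injEq]
          exact hhd b rfl
      show pvG (pvOpp d) (pvG d (pvOpp d :: zt)) = pvOpp d :: zt
      unfold pvG
      simp [hne]
  · show pvG (pvOpp d) (pvG d z) = z
    unfold pvG
    simp [h, hd]

-- ===== A-side: the stack pass computes pvRed on all-direction plans =====
theorem dirReducGo_red :
    ∀ (l acc : List String), pvRedP acc → (∀ x ∈ acc, x ∈ pvDirs) → (∀ x ∈ l, x ∈ pvDirs) →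
      dirReducGo acc l = List.foldr pvG (pvRed l) acc := by
  intro l
  induction l with
  | nil => intro acc hacc _ _; exact (pvRed_id hacc).symm
  | cons d t ih =>
    intro acc hacc haccm hlm
    have hd : d ∈ pvDirs := hlm d (by simp)
    have htm : ∀ x ∈ t, x ∈ pvDirs := fun x hx => hlm x (by simp [hx])
    rw [dirReducGo]
    split
    · rename_i hcond
      obtain ⟨hne, hlast⟩ := hcond
      have hrw : acc = acc.dropLast ++ [acc.getLast hne] := (List.dropLast_append_getLast hne).symm
      have hlv : acc.getLast hne = pvOpp d := by
        rw [List.getLast?_eq_some_getLast hne] at hlast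
        exact Option.some.inj hlast
      have hdrop : pvRedP acc.dropLast := by
        have h2 := hacc
        rw [hrw] at h2
        exact h2.left_of_append
      have hdropm : ∀ x ∈ acc.dropLast, x ∈ pvDirs :=
        fun x hx => haccm x (List.dropLast_subset _ hx)
      rw [ih acc.dropLast hdrop hdropm htm]
      conv_rhs => rw [hrw]
      rw [List.foldr_append]
      have hstep : pvRed (d :: t) = pvG d (pvRed t) := rfl
      rw [hstep]
      simp only [List.foldr_cons, List.foldr_nil, hlv]
      rw [pvG_cancel (pvOpp_invol hd) (pvRed_redP t)]
    · rename_i hcond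
      rw [not_and_or] at hcond
      have hlastne : acc.getLast? ≠ some (pvOpp d) := by
        rcases hcond with h1 | h2
        · simp only [ne_eq, not_not] at h1
          subst h1; simp
        · exact h2
      have hchain : pvRedP (acc ++ [d]) := by
        refine List.IsChain.append hacc (List.isChain_singleton d) ?_
        intro x hx y hy
        simp only [List.head?_cons, Option.mem_def, Option.some.injEq] at hy
        subst hy
        intro hdo
        have hxmem : x ∈ acc := List.mem_of_getLast? hx
        have hxv : x ∈ pvDirs := haccm x hxmem
        apply hlastne
        have : pvOpp d = x := by rw [hdo, pvOpp_invol hxv]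
        rw [this]
        exact hx
      have haccdm : ∀ x ∈ acc ++ [d], x ∈ pvDirs := by
        intro x hx
        rcases List.mem_append.mp hx with h | h
        · exact haccm x h
        · simp only [List.mem_singleton] at h; subst h; exact hd
      rw [ih (acc ++ [d]) hchain haccdm htm, List.foldr_append]
      rfl

theorem dirReduc_eq_red {plan : List String} (h : ∀ x ∈ plan, x ∈ pvDirs) :
    dirReduc plan = pvRed plan := by
  unfold dirReduc
  rw [dirReducGo_red plan [] List.IsChain.nil (by simp) h]
  rfl

-- A-side barrier: an invalid head never pops, so it floats above the rest of the pass
theorem dirReducGo_barrier {b : String} (hb : b ∉ pvDirs) :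
    ∀ (l : List String), (∀ x ∈ l, x ∈ pvDirs) →
      ∀ (acc : List String), dirReducGo (b :: acc) l = b :: dirReducGo acc l := by
  intro l
  induction l with
  | nil => intro _ acc; rfl
  | cons d t ih =>
    intro hm acc
    have hd : d ∈ pvDirs := hm d (by simp)
    have htm : ∀ x ∈ t, x ∈ pvDirs := fun x hx => hm x (by simp [hx])
    cases acc with
    | nil =>
      have hbne : b ≠ pvOpp d := fun h => hb (h ▸ pvOpp_mem hd)
      rw [dirReducGo, dirReducGo, if_neg (by simp [hbne]), if_neg (by simp)]
      exact ih htm [d]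
    | cons a as =>
      rw [dirReducGo, dirReducGo]
      have hlast : (b :: a :: as).getLast? = (a :: as).getLast? := by
        simp [List.getLast?_cons_cons]
      by_cases hc : (a :: as).getLast? = some (pvOpp d)
      · rw [if_pos (by simp [hlast, hc]), if_pos (by simp [hc])]
        have hdropc : (b :: a :: as).dropLast = b :: (a :: as).dropLast := by
          simp [List.dropLast_cons_of_ne_nil]
        rw [hdropc]
        exact ih htm (a :: as).dropLast
      · rw [if_neg (by simp [hlast, hc]), if_neg (by simp [hc])]
        have : (b :: a :: as) ++ [d] = b :: ((a :: as) ++ [d]) := rfl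
        rw [this]
        exact ih htm ((a :: as) ++ [d])

-- ===== B-side: the fixpoint rewriter computes pvRed on all-direction plans =====
theorem pvOnePass_none_redP : ∀ {z : List String}, (∀ x ∈ z, x ∈ pvDirs) →
    pvOnePass z = none → pvRedP z := by
  intro z
  induction z with
  | nil => intro _ _; exact List.IsChain.nil
  | cons x t ih =>
    intro hm h
    cases t with
    | nil => exact List.isChain_singleton x
    | cons y t' =>
      simp only [pvOnePass] at h
      split at h
      · cases h
      · rename_i hne
        have h' : pvOnePass (y :: t') = none := by
          cases hpp : pvOnePass (y :: t') with
          | none => rfl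
          | some r => rw [hpp] at h; simp at h
        have hx : x ∈ pvDirs := hm x (by simp)
        refine List.isChain_cons_cons.mpr ⟨?_, ih (fun a ha => hm a (by simp [ha])) h'⟩
        intro hyx
        exact hne (by rw [hyx, pvOpp_invol hx])
  -- note: hyx : y = pvOpp x gives x = pvOpp y by involution on x

theorem pvOnePass_subset : ∀ {z r : List String}, pvOnePass z = some r → ∀ x ∈ r, x ∈ z := by
  intro z
  induction z with
  | nil => intro r h; simp [pvOnePass] at h
  | cons a t ih =>
    intro r h
    cases t with
    | nil => simp [pvOnePass] at h
    | cons y t' =>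
      simp only [pvOnePass] at h
      split at h
      · cases h; intro x hx; simp [hx]
      · rcases Option.map_eq_some_iff.mp h with ⟨r', hr', rfl⟩
        intro x hx
        rcases List.mem_cons.mp hx with rfl | hx'
        · simp
        · exact List.mem_cons_of_mem a (ih hr' x hx')

theorem pvOnePass_some_red : ∀ {z r : List String}, (∀ x ∈ z, x ∈ pvDirs) →
    pvOnePass z = some r → pvRed r = pvRed z := by
  intro z
  induction z with
  | nil => intro r _ h; simp [pvOnePass] at h
  | cons x t ih =>
    intro r hm h
    cases t with
    | nil => simp [pvOnePass] at h
    | cons y t' =>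
      simp only [pvOnePass] at h
      split at h
      · rename_i hxy
        injection h with h2
        subst h2
        have hy : y ∈ pvDirs := hm y (by simp)
        have hstep : pvRed (x :: y :: t') = pvG x (pvG y (pvRed t')) := rfl
        rw [hstep, hxy, pvG_cancel (pvOpp_invol hy) (pvRed_redP t')]
      · rcases Option.map_eq_some_iff.mp h with ⟨r', hr', rfl⟩
        have hm' : ∀ a ∈ y :: t', a ∈ pvDirs := fun a ha => hm a (by simp [ha])
        have hstep : pvRed (x :: r') = pvG x (pvRed r') := rfl
        rw [hstep, ih hm' hr']
        rfl

theorem pvLoop_red : ∀ (z : List String), (∀ x ∈ z, x ∈ pvDirs) → pvLoop z = pvRed z := by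
  intro z
  induction z using pvLoop.induct with
  | case1 z r hsome ih =>
    intro hm
    have hz : pvLoop z = pvLoop r := by rw [pvLoop]; split <;> simp_all
    rw [hz, ih (fun x hx => hm x (pvOnePass_subset hsome x hx)), pvOnePass_some_red hm hsome]
  | case2 z hnone =>
    intro hm
    have hz : pvLoop z = z := by rw [pvLoop]; split <;> simp_all
    rw [hz]
    exact (pvRed_id (pvOnePass_none_redP hm hnone)).symm

-- B-side barrier: an invalid head never matches opposite[y], so it floats above the loop
theorem pvOnePass_barrier {b : String} (hb : b ∉ pvDirs) {w : List String}
    (hm : ∀ x ∈ w, x ∈ pvDirs) : pvOnePass (b :: w) = (pvOnePass w).map (b :: ·) := by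
  cases w with
  | nil => simp [pvOnePass]
  | cons y t =>
    have hy : y ∈ pvDirs := hm y (by simp)
    have hbne : b ≠ pvOpp y := fun h => hb (h ▸ pvOpp_mem hy)
    simp [pvOnePass, hbne]

theorem pvLoop_barrier {b : String} (hb : b ∉ pvDirs) :
    ∀ (w : List String), (∀ x ∈ w, x ∈ pvDirs) → pvLoop (b :: w) = b :: pvLoop w := by
  intro w
  induction w using pvLoop.induct with
  | case1 w r hsome ih =>
    intro hm
    have hstep : pvOnePass (b :: w) = some (b :: r) := by
      rw [pvOnePass_barrier hb hm, hsome]; rfl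
    have h1 : pvLoop (b :: w) = pvLoop (b :: r) := by rw [pvLoop]; split <;> simp_all
    have h2 : pvLoop w = pvLoop r := by rw [pvLoop]; split <;> simp_all
    rw [h1, h2, ih (fun x hx => hm x (pvOnePass_subset hsome x hx))]
  | case2 w hnone =>
    intro hm
    have hstep : pvOnePass (b :: w) = none := by
      rw [pvOnePass_barrier hb hm, hnone]; rfl
    have h1 : pvLoop (b :: w) = b :: w := by rw [pvLoop]; split <;> simp_all
    have h2 : pvLoop w = w := by rw [pvLoop]; split <;> simp_all
    rw [h1, h2]

-- ===== VERDICT (by name: the statement is the Claim_ definition above) =====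
theorem dirReduc_spec : Claim_equal_dirReduc := by
  intro plan _ hpre
  unfold Spec_dirReduc
  cases plan with
  | nil =>
    show dirReducGo [] [] = pvLoop []
    have : pvLoop ([] : List String) = [] := by rw [pvLoop]; split <;> simp_all [pvOnePass]
    rw [this]; rfl
  | cons b t =>
    have htm : ∀ x ∈ t, x ∈ pvDirs := by
      intro x hx
      exact hpre x (by simpa using hx)
    by_cases hb : b ∈ pvDirs
    · have hall : ∀ x ∈ b :: t, x ∈ pvDirs := by
        intro x hx
        rcases List.mem_cons.mp hx with rfl | hx'
        · exact hb
        · exact htm x hx'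
      rw [dirReduc_eq_red hall]
      exact (pvLoop_red _ hall).symm
    · show dirReducGo [] (b :: t) = pvLoop (b :: t)
      rw [dirReducGo, if_neg (by simp)]
      have h1 : dirReducGo ([] ++ [b]) t = dirReducGo (b :: []) t := rfl
      rw [h1, dirReducGo_barrier hb t htm []]
      rw [pvLoop_barrier hb t htm]
      have h2 : dirReducGo [] t = dirReduc t := rfl
      rw [h2, dirReduc_eq_red htm, pvLoop_red t htm]
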